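-- pv_equiv track=rewrite | github.com/xlf0708/MultiLabelClassification-master | xiao/SCMJ/sichuanMJ_v2.py | recommend_c_type_card
-- ===== SOURCE A (Python) =====
-- def recommend_c_type_card(cards=[], c_type=None):
--     '''
--     功能：若手牌中存在定缺牌，按定缺牌的优先级选择出牌
--     :param cards: 手牌
--     :param c_type: 定缺花色
--     '''
--     t1_type = [[], [], []]  # 按优先级分类
--     for card in cards:
--         if card & 0xF0 == c_type:
--             if card & 0x0F in [1, 9]:
--                 t1_type[0].append(card)
--             if card & 0x0F in [2, 8]:
--                 t1_type[1].append(card)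
--             else:
--                 t1_type[2].append(card)
--     if t1_type[0]:
--         return t1_type[0][0]
--     elif t1_type[1]:
--         return t1_type[1][0]
--     else:
--         return t1_type[2][0]
-- ===== SOURCE B (Python) =====
-- def recommend_c_type_card(cards=[], c_type=None):
--     suit_cards = [c for c in cards if c & 0xF0 == c_type]
--     def priority(c):
--         r = c & 0x0F
--         return 0 if r in (1, 9) else 1 if r in (2, 8) else 2
--     return min(suit_cards, key=priority)
-- ===== Notes on version B (the rewrite author's own statement) =====
-- stated objective: idiomatic
-- what changed: Replaces the three append-buckets and the cascade of truthiness checks with a filter of the matching suit plus min(key=priority); Python's min returns the first minimal element, which is exactly A's first-of-highest-priority pick.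
import Mathlib
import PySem

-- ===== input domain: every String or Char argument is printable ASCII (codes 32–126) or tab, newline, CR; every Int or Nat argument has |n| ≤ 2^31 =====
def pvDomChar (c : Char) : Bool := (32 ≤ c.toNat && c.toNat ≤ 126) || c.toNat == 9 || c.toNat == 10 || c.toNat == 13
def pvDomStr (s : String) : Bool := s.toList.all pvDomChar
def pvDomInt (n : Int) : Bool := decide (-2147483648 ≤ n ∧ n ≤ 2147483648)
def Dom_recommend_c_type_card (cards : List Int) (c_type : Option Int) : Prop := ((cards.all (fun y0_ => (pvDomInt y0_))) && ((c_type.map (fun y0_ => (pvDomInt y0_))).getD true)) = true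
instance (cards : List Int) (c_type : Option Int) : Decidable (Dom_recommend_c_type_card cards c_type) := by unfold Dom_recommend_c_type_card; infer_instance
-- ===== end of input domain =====

-- ===== PORT A =====
-- B replaces A's three append-buckets and truthiness cascade by filter + min(key=priority) (idiomatic).
-- Port of A: fold the three priority buckets over the cards, then the truthiness cascade.
-- The final t1_type[2][0] can raise IndexError (no card of the missing suit): excluded by Pre_.
def recommend_c_type_card (cards : List Int) (c_type : Option Int) : Int :=
  let t1_type : List Int × List Int × List Int :=
    cards.foldl (fun b card =>
      if some (PySem.Int.band card 240) = c_type then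
        let b := if PySem.Int.band card 15 = 1 ∨ PySem.Int.band card 15 = 9 then (b.1 ++ [card], b.2.1, b.2.2) else b
        if PySem.Int.band card 15 = 2 ∨ PySem.Int.band card 15 = 8 then (b.1, b.2.1 ++ [card], b.2.2)
        else (b.1, b.2.1, b.2.2 ++ [card])
      else b) ([], [], [])
  if t1_type.1 ≠ [] then (PySem.List.pyGet? t1_type.1 0).getD 0
  else if t1_type.2.1 ≠ [] then (PySem.List.pyGet? t1_type.2.1 0).getD 0
  else (PySem.List.pyGet? t1_type.2.2 0).getD 0   -- none (IndexError) only outside Pre_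

-- ===== PORT B =====
def pvPrio (c : Int) : Int :=
  if PySem.Int.band c 15 = 1 ∨ PySem.Int.band c 15 = 9 then 0 else if PySem.Int.band c 15 = 2 ∨ PySem.Int.band c 15 = 8 then 1 else 2

-- Port of B: filter the matching suit, take min by priority (min raises only outside Pre_).
def recommend_c_type_card_alt (cards : List Int) (c_type : Option Int) : Int :=
  let suit_cards := cards.filter (fun c => decide (some (PySem.Int.band c 240) = c_type))
  (PySem.List.min? suit_cards pvPrio).getD 0

-- ===== PRECONDITION & SPEC =====
-- Pre_: at least one card of the missing suit; otherwise A raises IndexError (and B ValueError).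
def Pre_recommend_c_type_card (cards : List Int) (c_type : Option Int) : Prop :=
  ∃ c ∈ cards, some (PySem.Int.band c 240) = c_type
instance (cards : List Int) (c_type : Option Int) : Decidable (Pre_recommend_c_type_card cards c_type) := by unfold Pre_recommend_c_type_card; infer_instance

def pvWitness_recommend_c_type_card : List Int × Option Int := ([18, 17, 25], some 16)

def Spec_recommend_c_type_card (cards : List Int) (c_type : Option Int) (out : Int) : Prop := out = recommend_c_type_card_alt cards c_type
instance (cards : List Int) (c_type : Option Int) (out : Int) : Decidable (Spec_recommend_c_type_card cards c_type out) := by unfold Spec_recommend_c_type_card; infer_instance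

-- ===== CLAIM (what is proved, stated in full; the proofs are below) =====
def Claim_equal_recommend_c_type_card : Prop := ∀ (cards : List Int) (c_type : Option Int), Dom_recommend_c_type_card cards c_type → Pre_recommend_c_type_card cards c_type → Spec_recommend_c_type_card cards c_type (recommend_c_type_card cards c_type)

-- ===== LEMMAS AND PROOFS =====

def pvP0 (c : Int) : Bool := decide (PySem.Int.band c 15 = 1 ∨ PySem.Int.band c 15 = 9)
def pvP1 (c : Int) : Bool := decide (PySem.Int.band c 15 = 2 ∨ PySem.Int.band c 15 = 8)

theorem pvPrio_p0 {c : Int} (h : pvP0 c = true) : pvPrio c = 0 := by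
  simp [pvP0] at h; simp [pvPrio, h]
theorem pvPrio_p1 {c : Int} (h0 : pvP0 c = false) (h1 : pvP1 c = true) : pvPrio c = 1 := by
  simp [pvP0] at h0; simp [pvP1] at h1
  simp [pvPrio, h1]
  omega
theorem pvPrio_p2 {c : Int} (h0 : pvP0 c = false) (h1 : pvP1 c = false) : pvPrio c = 2 := by
  simp [pvP0] at h0; simp [pvP1] at h1
  simp [pvPrio]
  omega

-- the bucket fold of A computes three filters of the suit cards
theorem pvBuckets (c_type : Option Int) (l : List Int) (b0 b1 b2 : List Int) :
    l.foldl (fun b card =>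
      if some (PySem.Int.band card 240) = c_type then
        let b := if PySem.Int.band card 15 = 1 ∨ PySem.Int.band card 15 = 9 then (b.1 ++ [card], b.2.1, b.2.2) else b
        if PySem.Int.band card 15 = 2 ∨ PySem.Int.band card 15 = 8 then (b.1, b.2.1 ++ [card], b.2.2)
        else (b.1, b.2.1, b.2.2 ++ [card])
      else b) (b0, b1, b2)
    = (b0 ++ ((l.filter (fun c => decide (some (PySem.Int.band c 240) = c_type))).filter pvP0),
       b1 ++ ((l.filter (fun c => decide (some (PySem.Int.band c 240) = c_type))).filter pvP1),
       b2 ++ ((l.filter (fun c => decide (some (PySem.Int.band c 240) = c_type))).filter (fun c => !pvP1 c))) := by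
  induction l generalizing b0 b1 b2 with
  | nil => simp
  | cons x t ih =>
    by_cases hs : some (PySem.Int.band x 240) = c_type
    · by_cases h0 : PySem.Int.band x 15 = 1 ∨ PySem.Int.band x 15 = 9
      · by_cases h1 : PySem.Int.band x 15 = 2 ∨ PySem.Int.band x 15 = 8
        · rcases h0 with h | h <;> rcases h1 with h' | h' <;> omega
        · simp [List.foldl_cons, hs, h0, h1, ih, pvP0, pvP1, List.filter_cons]
          push Not at h1
          simp [h1.1, h1.2]
      · by_cases h1 : PySem.Int.band x 15 = 2 ∨ PySem.Int.band x 15 = 8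
        · simp [List.foldl_cons, hs, h0, h1, ih, pvP0, pvP1, List.filter_cons]
          tauto
        · simp [List.foldl_cons, hs, h0, h1, ih, pvP0, pvP1, List.filter_cons]
          push Not at h1
          simp [h1.1, h1.2]
    · simp [List.foldl_cons, hs, ih]

-- min? over a cons combines the head with min? of the tail, preferring the earlier element on ties
theorem pvMin_cons (x : Int) (t : List Int) :
    PySem.List.min? (x :: t) pvPrio =
      some ((PySem.List.min? t pvPrio).elim x (fun m => if pvPrio m < pvPrio x then m else x)) := by
  induction t generalizing x with
  | nil => simp [PySem.List.min?]
  | cons y r ih =>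
    have hx : PySem.List.min? (x :: y :: r) pvPrio
        = PySem.List.min? ((if pvPrio y < pvPrio x then y else x) :: r) pvPrio := by
      simp [PySem.List.min?, List.foldl_cons]
      split <;> rfl
    rw [hx, ih, ih]
    cases h : PySem.List.min? r pvPrio with
    | none => simp
    | some m => simp; split_ifs <;> simp_all <;> omega

theorem pvPrio_pos {c : Int} (h : pvP0 c = false) : 1 ≤ pvPrio c := by
  simp [pvP0] at h
  simp [pvPrio, h.1, h.2]
  split <;> omega

theorem pvPrio_mem_f1 {m : Int} {t : List Int} (hf0 : t.filter pvP0 = [])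
    (hm : m ∈ t.filter pvP1) : pvPrio m = 1 := by
  rcases List.mem_filter.mp hm with ⟨hmt, hm1⟩
  have hm0 : pvP0 m = false := by
    by_contra hb
    simp only [Bool.not_eq_false] at hb
    have : m ∈ t.filter pvP0 := List.mem_filter.mpr ⟨hmt, hb⟩
    simp [hf0] at this
  exact pvPrio_p1 hm0 hm1

-- min by priority equals A's cascade over the filtered buckets
theorem pvPrio_nonneg (c : Int) : 0 ≤ pvPrio c := by
  simp [pvPrio]; split_ifs <;> omega

theorem pvMin_cascade (s : List Int) (hs : s ≠ []) :
    (PySem.List.min? s pvPrio).getD 0 =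
      (if s.filter pvP0 ≠ [] then ((s.filter pvP0).headI)
       else if s.filter pvP1 ≠ [] then ((s.filter pvP1).headI)
       else ((s.filter (fun c => !pvP1 c)).headI)) := by
  induction s with
  | nil => exact absurd rfl hs
  | cons x t ih =>
    rw [pvMin_cons]
    simp only [Option.getD_some]
    cases hm : PySem.List.min? t pvPrio with
    | none =>
      -- t is empty
      cases t with
      | nil =>
        by_cases h0 : pvP0 x = true
        · simp [h0]
        · by_cases h1 : pvP1 x = true
          · simp [h0, h1]
          · simp [h0, h1]
      | cons y r => rw [pvMin_cons] at hm; cases hm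
    | some m =>
      have ht : t ≠ [] := by
        intro hnil; rw [hnil] at hm; simp [PySem.List.min?] at hm
      have ihr := ih ht
      rw [hm] at ihr
      simp only [Option.getD_some, Option.elim] at ihr ⊢
      have hmt : m ∈ t := PySem.List.min?_mem hm
      have hmn : 0 ≤ pvPrio m := pvPrio_nonneg m
      by_cases h0 : pvP0 x = true
      · -- x itself has top priority: both sides pick x
        have hx0 : pvPrio x = 0 := pvPrio_p0 h0
        rw [List.filter_cons_of_pos (by simpa using h0)]
        rw [if_neg (show ¬ pvPrio m < pvPrio x by omega)]
        rw [if_pos (show (x :: List.filter pvP0 t) ≠ [] from by simp)]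
        rfl
      · have hxe : (x :: t).filter pvP0 = t.filter pvP0 :=
          List.filter_cons_of_neg (by simpa using h0)
        by_cases hf0 : t.filter pvP0 = []
        · -- no priority-0 card anywhere
          have hm1 : 1 ≤ pvPrio m := by
            apply pvPrio_pos
            by_contra hb
            simp only [Bool.not_eq_false] at hb
            have : m ∈ t.filter pvP0 := List.mem_filter.mpr ⟨hmt, hb⟩
            simp [hf0] at this
          rw [hxe, if_neg (show ¬ (List.filter pvP0 t ≠ []) from by simp [hf0])]
          rw [if_neg (show ¬ (List.filter pvP0 t ≠ []) from by simp [hf0])] at ihr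
          by_cases h1 : pvP1 x = true
          · -- x has priority 1 and comes first: both sides pick x
            have hx1 : pvPrio x = 1 := pvPrio_p1 (by simpa using h0) h1
            rw [List.filter_cons_of_pos (by simpa using h1)]
            rw [if_neg (show ¬ pvPrio m < pvPrio x by omega)]
            rw [if_pos (show (x :: List.filter pvP1 t) ≠ [] from by simp)]
            rfl
          · have hx2 : pvPrio x = 2 := pvPrio_p2 (by simpa using h0) (by simpa using h1)
            have hxe1 : (x :: t).filter pvP1 = t.filter pvP1 :=
              List.filter_cons_of_neg (by simpa using h1)
            rw [hxe1]
            by_cases hf1 : t.filter pvP1 = []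
            · -- all priority 2: the earlier x wins
              have hm2 : pvPrio m = 2 := by
                have hb1 : pvP1 m = false := by
                  by_contra hb
                  simp only [Bool.not_eq_false] at hb
                  have : m ∈ t.filter pvP1 := List.mem_filter.mpr ⟨hmt, hb⟩
                  simp [hf1] at this
                have hb0 : pvP0 m = false := by
                  by_contra hb
                  simp only [Bool.not_eq_false] at hb
                  have : m ∈ t.filter pvP0 := List.mem_filter.mpr ⟨hmt, hb⟩
                  simp [hf0] at this
                exact pvPrio_p2 hb0 hb1
              rw [if_neg (show ¬ (List.filter pvP1 t ≠ []) from by simp [hf1])]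
              rw [if_neg (show ¬ pvPrio m < pvPrio x by omega)]
              rw [List.filter_cons_of_pos (by simp [h1])]
              rfl
            · -- a priority-1 card exists in t: m beats x
              rcases List.exists_mem_of_ne_nil _ hf1 with ⟨y, hy⟩
              have hym : pvPrio m ≤ pvPrio y := PySem.List.min?_isMin hm y (List.mem_filter.mp hy).1
              have hy1 : pvPrio y = 1 := pvPrio_mem_f1 hf0 hy
              rw [if_pos (show pvPrio m < pvPrio x by omega)]
              rw [if_pos hf1]
              rw [if_pos hf1] at ihr
              exact ihr
        · -- a priority-0 card exists in t: m beats x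
          rcases List.exists_mem_of_ne_nil _ hf0 with ⟨y, hy⟩
          have hym : pvPrio m ≤ pvPrio y := PySem.List.min?_isMin hm y (List.mem_filter.mp hy).1
          have hy0 : pvPrio y = 0 := pvPrio_p0 (List.mem_filter.mp hy).2
          have hx1 : 1 ≤ pvPrio x := pvPrio_pos (by simpa using h0)
          rw [if_pos (show pvPrio m < pvPrio x by omega)]
          rw [hxe, if_pos hf0]
          rw [if_pos hf0] at ihr
          exact ihr

-- ===== VERDICT (by name: the statement is the Claim_ definition above) =====
theorem recommend_c_type_card_spec : Claim_equal_recommend_c_type_card := by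
  intro cards c_type _ hpre
  unfold Spec_recommend_c_type_card recommend_c_type_card recommend_c_type_card_alt
  rw [pvBuckets]
  set s := cards.filter (fun c => decide (some (PySem.Int.band c 240) = c_type)) with hsdef
  have hs : s ≠ [] := by
    rcases hpre with ⟨c, hc, hcc⟩
    intro hnil
    have : c ∈ s := List.mem_filter.mpr ⟨hc, by simpa using hcc⟩
    simp [hnil] at this
  rw [pvMin_cascade s hs]
  simp only [List.nil_append]
  have hget : ∀ (l : List Int), l ≠ [] → (PySem.List.pyGet? l 0).getD 0 = l.headI := by
    intro l hl
    rcases List.exists_cons_of_ne_nil hl with ⟨a, r, rfl⟩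
    simp [PySem.List.pyGet?, PySem.List.pyIdx?]
  split_ifs with h0 h1
  · exact hget _ h0
  · exact hget _ h1
  · apply hget
    have hall : s.filter (fun c => !pvP1 c) = s := by
      apply List.filter_eq_self.mpr
      intro y hy
      by_contra hb
      have hb' : pvP1 y = true := by
        cases hv : pvP1 y
        · simp [hv] at hb
        · rfl
      have : y ∈ s.filter pvP1 := List.mem_filter.mpr ⟨hy, hb'⟩
      simp only [not_not] at h1
      simp [h1] at this
    rw [hall]
    exact hs
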